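-- pv_equiv track=rewrite | github.com/brl053/Unhinged | build/tmp-migration/python/validate_migration.py | _is_acceptable_print
-- ===== SOURCE A (Python) =====
-- def _is_acceptable_print(print_stmt: str, content: str) -> bool:
--     """Check if a print statement is acceptable (e.g., in main block)"""
--     # Simple heuristic: if it's in a main block or test function
--     lines = content.split('\n')
--     for i, line in enumerate(lines):
--         if print_stmt.replace(' ', '') in line.replace(' ', ''):
--             # Check surrounding context
--             context_start = max(0, i - 5)
--             context_end = min(len(lines), i + 5)
--             context = '\n'.join(lines[context_start:context_end])
--
--             if ('if __name__ == "__main__"' in context or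
--                 'def test_' in context or
--                 'def main(' in context):
--                 return True
--     return False
-- ===== SOURCE B (Python) =====
-- MARKERS = ('if __name__ == "__main__"', 'def test_', 'def main(')
--
-- def _is_acceptable_print(print_stmt: str, content: str) -> bool:
--     """Two-pass version: index the marker lines once, then check each print
--     line's window i-5..i+4 against that index."""
--     lines = content.split('\n')
--     marker_idx = [j for j, ln in enumerate(lines)
--                   if any(m in ln for m in MARKERS)]
--     needle = print_stmt.replace(' ', '')
--     for i, line in enumerate(lines):
--         if needle in line.replace(' ', ''):
--             if any(i - 5 <= j <= i + 4 for j in marker_idx):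
--                 return True
--     return False
-- ===== Notes on version B (the rewrite author's own statement) =====
-- stated objective: alternative
-- what changed: B replaces A's per-hit slicing and '\n'-joining of the surrounding lines (re-scanned for markers on every print match) with a single precomputed index of marker-line numbers, against which each print line checks the window i-5..i+4.
import Mathlib
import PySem

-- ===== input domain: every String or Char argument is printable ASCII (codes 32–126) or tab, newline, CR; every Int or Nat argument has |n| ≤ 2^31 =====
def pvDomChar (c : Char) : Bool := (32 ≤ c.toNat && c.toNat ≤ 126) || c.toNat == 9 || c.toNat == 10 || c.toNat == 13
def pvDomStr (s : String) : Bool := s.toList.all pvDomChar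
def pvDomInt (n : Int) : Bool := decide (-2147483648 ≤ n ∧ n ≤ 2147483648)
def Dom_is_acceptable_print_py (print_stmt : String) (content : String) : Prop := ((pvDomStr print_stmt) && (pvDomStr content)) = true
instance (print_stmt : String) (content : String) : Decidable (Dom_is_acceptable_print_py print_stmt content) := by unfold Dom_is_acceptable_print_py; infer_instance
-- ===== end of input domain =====

-- B re-decomposes A's per-hit context join into one precomputed marker-line index plus a
-- window test (objective: alternative decomposition; same asymptotic cost on these inputs).

-- the three context markers (shared string constants)
def pvMarker1 : String := "if __name__ == \"__main__\""
def pvMarker2 : String := "def test_"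
def pvMarker3 : String := "def main("

-- ===== PORT A =====
-- A's loop: for each (i, line), test the normalized print match, then join the
-- context slice lines[max 0 (i-5) : min len (i+5)] and look for a marker in it.
def pvALoop (print_stmt : String) (lines : List String) : List (Int × String) → Bool
  | [] => false
  | (i, line) :: rest =>
    if PySem.Str.isIn (PySem.Str.replace print_stmt " " "") (PySem.Str.replace line " " "") then
      let contextStart : Int := max 0 (i - 5)
      let contextEnd : Int := min (lines.length : Int) (i + 5)
      let context : String := PySem.Str.join "\n" (PySem.List.slice lines (some contextStart) (some contextEnd))
      if PySem.Str.isIn pvMarker1 context || PySem.Str.isIn pvMarker2 context || PySem.Str.isIn pvMarker3 context then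
        true
      else
        pvALoop print_stmt lines rest
    else
      pvALoop print_stmt lines rest

def is_acceptable_print_py (print_stmt : String) (content : String) : Bool :=
  -- content.split('\n'): the separator is non-empty, so split? is always `some`
  let lines : List String := (PySem.Str.split? content "\n").getD []
  pvALoop print_stmt lines (PySem.List.enumerate lines 0)

-- ===== PORT B =====
def pvAnyMarker (line : String) : Bool :=
  PySem.Str.isIn pvMarker1 line || PySem.Str.isIn pvMarker2 line || PySem.Str.isIn pvMarker3 line

-- [j for j, ln in enumerate(lines) if any(m in ln for m in MARKERS)]
def pvMarkerIdx (lines : List String) : List Int :=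
  (PySem.List.enumerate lines 0).filterMap (fun p => if pvAnyMarker p.2 then some p.1 else none)

-- B's loop: for each (i, line) matching the needle, check the precomputed marker
-- indices against the window i-5 .. i+4.
def pvBLoop (needle : String) (markerIdx : List Int) : List (Int × String) → Bool
  | [] => false
  | (i, line) :: rest =>
    if PySem.Str.isIn needle (PySem.Str.replace line " " "") then
      if markerIdx.any (fun j => decide (i - 5 ≤ j) && decide (j ≤ i + 4)) then
        true
      else
        pvBLoop needle markerIdx rest
    else
      pvBLoop needle markerIdx rest

def is_acceptable_print_py_alt (print_stmt : String) (content : String) : Bool :=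
  let lines : List String := (PySem.Str.split? content "\n").getD []
  pvBLoop (PySem.Str.replace print_stmt " " "") (pvMarkerIdx lines) (PySem.List.enumerate lines 0)

-- ===== PRECONDITION & SPEC =====
def Spec_is_acceptable_print_py (print_stmt : String) (content : String) (out : Bool) : Prop := out = is_acceptable_print_py_alt print_stmt content
instance (print_stmt : String) (content : String) (out : Bool) : Decidable (Spec_is_acceptable_print_py print_stmt content out) := by unfold Spec_is_acceptable_print_py; infer_instance

-- ===== CLAIM (what is proved, stated in full; the proofs are below) =====
def Claim_equal_is_acceptable_print_py : Prop := ∀ (print_stmt : String) (content : String), Dom_is_acceptable_print_py print_stmt content → Spec_is_acceptable_print_py print_stmt content (is_acceptable_print_py print_stmt content)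

-- ===== LEMMAS AND PROOFS =====

-- If c does not occur in sub, an occurrence of sub in p ++ c :: t lies entirely in p or entirely in t.
lemma pv_infix_split {sub p t : List Char} {c : Char} (hc : c ∉ sub)
    (h : sub <:+: p ++ c :: t) : sub <:+: p ∨ sub <:+: t := by
  obtain ⟨s1, s2, hs⟩ := h
  by_cases hle : s1.length + sub.length ≤ p.length
  · left
    have hpre : s1 ++ sub <+: p ++ c :: t := ⟨s2, by simpa using hs⟩
    have hp : s1 ++ sub <+: p :=
      List.prefix_of_prefix_length_le hpre (List.prefix_append _ _) (by simp; omega)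
    exact ((List.suffix_append s1 sub).isInfix).trans hp.isInfix
  · have hgt : p.length + 1 ≤ s1.length := by
      by_contra hge
      push_neg at hge
      have h1 : s1.length ≤ p.length := by omega
      have h2 : p.length - s1.length < sub.length := by omega
      have hdrop := congrArg (List.drop s1.length) hs
      rw [List.drop_append, List.drop_append] at hdrop
      have e1 : s1.length - s1.length = 0 := by omega
      have e2 : s1.length - (s1 ++ sub).length = 0 := by simp
      rw [e1, e2] at hdrop
      simp only [List.drop_length, List.drop_zero, List.nil_append] at hdrop
      rw [List.drop_append_of_le_length h1] at hdrop
      -- hdrop : sub ++ s2 = p.drop s1.length ++ c :: t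
      have hlt2 : p.length - s1.length < (sub ++ s2).length := by simp <;> omega
      have hv1 : (sub ++ s2)[p.length - s1.length]'hlt2 = sub[p.length - s1.length]'h2 :=
        List.getElem_append_left h2
      have hlt3 : p.length - s1.length < (List.drop s1.length p ++ c :: t).length := by
        simp <;> omega
      have hv2 : (List.drop s1.length p ++ c :: t)[p.length - s1.length]'hlt3 = c := by
        rw [List.getElem_append_right (by simp)]
        simp
      have hveq : sub[p.length - s1.length]'h2 = c := by
        rw [← hv1, List.getElem_of_eq hdrop hlt2, hv2]
      exact hc (hveq ▸ List.getElem_mem h2)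
    right
    have hdrop := congrArg (List.drop (p.length + 1)) hs
    rw [List.drop_append, List.drop_append] at hdrop
    have h1 : p.length + 1 - s1.length = 0 := by omega
    have h2 : p.length + 1 - (s1 ++ sub).length = 0 := by simp <;> omega
    rw [h1, h2] at hdrop
    rw [List.drop_append] at hdrop
    simp at hdrop
    have e4 : List.drop (p.length + 1) p = [] := List.drop_eq_nil_of_le (by omega)
    rw [e4, List.nil_append] at hdrop
    exact ⟨_, _, by rw [List.append_assoc]; exact hdrop⟩

-- sub (newline-free, non-empty) occurs in '\n'.join(ps) iff it occurs in one of the newline-free parts ps.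
lemma pv_infix_intercalate (sub : List Char) (hne : sub ≠ []) (hc : '\n' ∉ sub) :
    ∀ (ps : List (List Char)), (∀ p ∈ ps, '\n' ∉ p) →
      (sub <:+: List.intercalate ['\n'] ps ↔ ∃ p ∈ ps, sub <:+: p)
  | [] => by
    intro _
    have hnil : List.intercalate ['\n'] ([] : List (List Char)) = [] := by
      simp [List.intercalate]
    rw [hnil]
    constructor
    · intro h
      exact absurd (List.eq_nil_of_infix_nil h) hne
    · rintro ⟨p, hp, _⟩
      exact absurd hp List.not_mem_nil
  | [a] => by
    intro _
    simp [List.intercalate]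
  | a :: b :: rest => by
    intro hp
    have hstep : List.intercalate ['\n'] (a :: b :: rest) = a ++ '\n' :: List.intercalate ['\n'] (b :: rest) := by
      simp [List.intercalate]
    rw [hstep]
    have ih := pv_infix_intercalate sub hne hc (b :: rest) (fun p hmem => hp p (List.mem_cons_of_mem _ hmem))
    constructor
    · intro h
      rcases pv_infix_split hc h with h' | h'
      · exact ⟨a, List.mem_cons_self, h'⟩
      · obtain ⟨p, hpm, hpi⟩ := ih.1 h'
        exact ⟨p, List.mem_cons_of_mem _ hpm, hpi⟩
    · rintro ⟨p, hpm, hpi⟩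
      rcases List.mem_cons.1 hpm with rfl | hpm
      · exact hpi.trans (List.prefix_append _ _).isInfix
      · have : sub <:+: List.intercalate ['\n'] (b :: rest) := ih.2 ⟨p, hpm, hpi⟩
        exact this.trans ((List.suffix_cons '\n' _).trans (List.suffix_append _ _)).isInfix

-- every piece produced by splitOn on '\n' is newline-free
lemma pv_go_nlfree : ∀ (fuel : Nat) (l cur : List Char) (acc : List (List Char)),
    l.length < fuel → '\n' ∉ cur → (∀ p ∈ acc, '\n' ∉ p) →
    ∀ p ∈ PySem.Chars.splitOn.go ['\n'] fuel l cur acc, '\n' ∉ p := by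
  intro fuel
  induction fuel with
  | zero => intro l cur acc hlen; omega
  | succ n ih =>
    intro l cur acc hlen hcur hacc p hp
    cases l with
    | nil =>
      rw [PySem.Chars.splitOn.go] at hp
      · simp at hp
        rcases hp with h | rfl
        · exact hacc _ h
        · simpa using hcur
      · omega
    | cons c rest =>
      rw [PySem.Chars.splitOn.go] at hp
      by_cases hpre : ['\n'].isPrefixOf (c :: rest) = true
      · rw [if_pos hpre] at hp
        refine ih _ [] _ (by simp at hlen ⊢; omega) (by simp) ?_ p hp
        intro q hq
        rcases List.mem_cons.1 hq with rfl | hq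
        · simpa using hcur
        · exact hacc _ hq
      · rw [if_neg hpre] at hp
        have hcne : c ≠ '\n' := by
          intro rfl_c
          exact hpre (by simp [List.isPrefixOf, rfl_c])
        refine ih rest (c :: cur) acc (by simp at hlen ⊢; omega) ?_ hacc p hp
        intro hmem
        rcases List.mem_cons.1 hmem with h | h
        · exact hcne h.symm
        · exact hcur h

lemma pv_splitOn_nlfree (s : List Char) :
    ∀ p ∈ PySem.Chars.splitOn s ['\n'], '\n' ∉ p := by
  have := pv_go_nlfree (s.length + 1) s [] [] (by omega) (by simp) (by simp)
  simpa [PySem.Chars.splitOn] using this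

-- an existential over a take-of-drop window, re-indexed into the base list
lemma pv_mem_take_drop_iff {α : Type} (xs : List α) (a m : Nat) (P : α → Prop) :
    (∃ x ∈ (xs.drop a).take m, P x) ↔
      ∃ k : Nat, a ≤ k ∧ k < a + m ∧ ∃ h : k < xs.length, P xs[k] := by
  constructor
  · rintro ⟨x, hx, hPx⟩
    obtain ⟨j, hj, hje⟩ := List.mem_iff_getElem.1 hx
    have hj' : j < m := by
      have := hj
      simp [List.length_take, List.length_drop] at this
      omega
    have hjd : j < (xs.drop a).length := by
      have := hj
      simp [List.length_take, List.length_drop] at this ⊢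
      omega
    have hk : a + j < xs.length := by
      simp [List.length_drop] at hjd
      omega
    refine ⟨a + j, by omega, by omega, hk, ?_⟩
    have : (List.take m (xs.drop a))[j]'hj = xs[a + j]'hk := by
      rw [List.getElem_take, List.getElem_drop]
    rw [← this, hje]
    exact hPx
  · rintro ⟨k, hak, hkm, hk, hPk⟩
    have hjd : k - a < (xs.drop a).length := by
      simp [List.length_drop]; omega
    have hjt : k - a < ((xs.drop a).take m).length := by
      simp [List.length_take, List.length_drop]; omega
    refine ⟨((xs.drop a).take m)[k - a]'hjt, List.getElem_mem _, ?_⟩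
    have : ((xs.drop a).take m)[k - a]'hjt = xs[k]'hk := by
      rw [List.getElem_take, List.getElem_drop]
      congr 1
      omega
    rw [this]
    exact hPk

-- membership in B's marker index
lemma pv_mem_markerIdx (lines : List String) (j : Int) :
    j ∈ pvMarkerIdx lines ↔
      ∃ (k : Nat) (h : k < lines.length), j = (k : Int) ∧ pvAnyMarker lines[k] = true := by
  unfold pvMarkerIdx
  simp only [List.mem_filterMap]
  constructor
  · rintro ⟨p, hp, hfp⟩
    obtain ⟨k, hk, rfl⟩ := (PySem.List.mem_enumerate_iff _ _ _).1 hp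
    by_cases hm : pvAnyMarker lines[k] = true
    · exact ⟨k, hk, by simpa using (by simp [hm] at hfp; simpa using hfp.symm), hm⟩
    · simp [hm] at hfp
  · rintro ⟨k, hk, rfl, hm⟩
    exact ⟨((k : Int), lines[k]), (PySem.List.mem_enumerate_iff _ _ _).2 ⟨k, hk, by simp⟩, by simp [hm]⟩

-- the marker strings are non-empty and newline-free
lemma pv_marker1_props : pvMarker1.toList ≠ [] ∧ '\n' ∉ pvMarker1.toList := by decide
lemma pv_marker2_props : pvMarker2.toList ≠ [] ∧ '\n' ∉ pvMarker2.toList := by decide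
lemma pv_marker3_props : pvMarker3.toList ≠ [] ∧ '\n' ∉ pvMarker3.toList := by decide

-- one marker in the joined context slice = that marker on some line of the slice
lemma pv_isIn_join (m : String) (hm : m.toList ≠ [] ∧ '\n' ∉ m.toList)
    (sl : List String) (hnl : ∀ ln ∈ sl, '\n' ∉ ln.toList) :
    (PySem.Str.isIn m (PySem.Str.join "\n" sl) = true) ↔ ∃ ln ∈ sl, PySem.Str.isIn m ln = true := by
  rw [PySem.Str.isIn_iff_infix]
  have hj : (PySem.Str.join "\n" sl).toList = List.intercalate ['\n'] (sl.map String.toList) := by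
    simp [PySem.Str.join, PySem.Chars.join]
  rw [hj]
  rw [pv_infix_intercalate m.toList hm.1 hm.2 (sl.map String.toList)
      (by intro p hp; obtain ⟨ln, hln, rfl⟩ := List.mem_map.1 hp; exact hnl ln hln)]
  constructor
  · rintro ⟨p, hp, hip⟩
    obtain ⟨ln, hln, rfl⟩ := List.mem_map.1 hp
    exact ⟨ln, hln, (PySem.Str.isIn_iff_infix _ _).2 hip⟩
  · rintro ⟨ln, hln, hi⟩
    exact ⟨ln.toList, List.mem_map.2 ⟨ln, hln, rfl⟩, (PySem.Str.isIn_iff_infix _ _).1 hi⟩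

-- the per-line equality of A's context test and B's window test
lemma pv_ctx_eq (lines : List String) (hnl : ∀ ln ∈ lines, '\n' ∉ ln.toList)
    (i : Int) (h0 : 0 ≤ i) (hl : i < (lines.length : Int)) :
    (let context := PySem.Str.join "\n" (PySem.List.slice lines (some (max 0 (i - 5))) (some (min (lines.length : Int) (i + 5))))
     PySem.Str.isIn pvMarker1 context || PySem.Str.isIn pvMarker2 context || PySem.Str.isIn pvMarker3 context)
      = (pvMarkerIdx lines).any (fun j => decide (i - 5 ≤ j) && decide (j ≤ i + 4)) := by
  dsimp only
  have hlen0 : (0 : Int) ≤ (lines.length : Int) := by positivity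
  have ha : PySem.List.clampIdx lines.length (max 0 (i - 5)) = (max 0 (i - 5)).toNat := by
    simp only [PySem.List.clampIdx]
    split_ifs <;> omega
  have hb : PySem.List.clampIdx lines.length (min (lines.length : Int) (i + 5)) = (min (lines.length : Int) (i + 5)).toNat := by
    simp only [PySem.List.clampIdx]
    split_ifs <;> omega
  have hslice : PySem.List.slice lines (some (max 0 (i - 5))) (some (min (lines.length : Int) (i + 5)))
      = (lines.drop (max 0 (i - 5)).toNat).take ((min (lines.length : Int) (i + 5)).toNat - (max 0 (i - 5)).toNat) := by
    simp only [PySem.List.slice, ha, hb]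
  rw [hslice]
  set a : Nat := (max 0 (i - 5)).toNat with ha_def
  set b : Nat := (min (lines.length : Int) (i + 5)).toNat with hb_def
  have haI : (a : Int) = max 0 (i - 5) := by rw [ha_def]; exact Int.toNat_of_nonneg (by omega)
  have hbI : (b : Int) = min (lines.length : Int) (i + 5) := by rw [hb_def]; exact Int.toNat_of_nonneg (by omega)
  have hab : a ≤ b := by omega
  have hnlsl : ∀ ln ∈ (lines.drop a).take (b - a), '\n' ∉ ln.toList := fun ln hln =>
    hnl ln (List.mem_of_mem_drop (List.mem_of_mem_take hln))
  rw [Bool.eq_iff_iff]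
  simp only [Bool.or_eq_true]
  rw [pv_isIn_join pvMarker1 pv_marker1_props _ hnlsl,
      pv_isIn_join pvMarker2 pv_marker2_props _ hnlsl,
      pv_isIn_join pvMarker3 pv_marker3_props _ hnlsl]
  rw [List.any_eq_true]
  constructor
  · intro h
    have hx : ∃ ln ∈ (lines.drop a).take (b - a), pvAnyMarker ln = true := by
      rcases h with (⟨ln, hm, hi'⟩ | ⟨ln, hm, hi'⟩) | ⟨ln, hm, hi'⟩
      · exact ⟨ln, hm, by simp only [pvAnyMarker, Bool.or_eq_true]; exact Or.inl (Or.inl hi')⟩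
      · exact ⟨ln, hm, by simp only [pvAnyMarker, Bool.or_eq_true]; exact Or.inl (Or.inr hi')⟩
      · exact ⟨ln, hm, by simp only [pvAnyMarker, Bool.or_eq_true]; exact Or.inr hi'⟩
    obtain ⟨k, hak, hkb, hkl, hmk⟩ := (pv_mem_take_drop_iff lines a (b - a) (fun ln => pvAnyMarker ln = true)).1 hx
    refine ⟨(k : Int), ?_, ?_⟩
    · exact (pv_mem_markerIdx lines (k : Int)).2 ⟨k, hkl, rfl, hmk⟩
    · simp only [Bool.and_eq_true, decide_eq_true_eq]
      omega
  · rintro ⟨j, hj, hw⟩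
    obtain ⟨k, hkl, rfl, hmk⟩ := (pv_mem_markerIdx lines j).1 hj
    simp only [Bool.and_eq_true, decide_eq_true_eq] at hw
    have hx := (pv_mem_take_drop_iff lines a (b - a) (fun ln => pvAnyMarker ln = true)).2
      ⟨k, by omega, by omega, hkl, hmk⟩
    obtain ⟨ln, hm, hi'⟩ := hx
    simp only [pvAnyMarker, Bool.or_eq_true] at hi'
    rcases hi' with (h1 | h2) | h3
    · exact Or.inl (Or.inl ⟨ln, hm, h1⟩)
    · exact Or.inl (Or.inr ⟨ln, hm, h2⟩)
    · exact Or.inr ⟨ln, hm, h3⟩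

-- the two loops agree element by element
lemma pv_loop_eq (print_stmt : String) (lines : List String)
    (hnl : ∀ ln ∈ lines, '\n' ∉ ln.toList) :
    ∀ l : List (Int × String), (∀ p ∈ l, 0 ≤ p.1 ∧ p.1 < (lines.length : Int)) →
      pvALoop print_stmt lines l = pvBLoop (PySem.Str.replace print_stmt " " "") (pvMarkerIdx lines) l
  | [] => by intro _; rfl
  | (i, line) :: rest => by
    intro hb
    have hi := hb (i, line) List.mem_cons_self
    have ih := pv_loop_eq print_stmt lines hnl rest (fun p hp => hb p (List.mem_cons_of_mem _ hp))
    simp only [pvALoop, pvBLoop]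
    rw [pv_ctx_eq lines hnl i hi.1 hi.2]
    split_ifs <;> simp [ih]

-- the split lines are newline-free (as strings)
lemma pv_lines_nlfree (content : String) :
    ∀ ln ∈ (PySem.Str.split? content "\n").getD [], '\n' ∉ ln.toList := by
  intro ln hln
  simp [PySem.Str.split?, PySem.Chars.split?] at hln
  obtain ⟨p, hp, rfl⟩ := hln
  rw [String.toList_ofList]
  exact pv_splitOn_nlfree _ p hp

-- ===== VERDICT (by name: the statement is the Claim_ definition above) =====
theorem is_acceptable_print_py_spec : Claim_equal_is_acceptable_print_py := by
  intro print_stmt content _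
  unfold Spec_is_acceptable_print_py is_acceptable_print_py is_acceptable_print_py_alt
  apply pv_loop_eq print_stmt _ (pv_lines_nlfree content)
  intro p hp
  obtain ⟨k, hk, rfl⟩ := (PySem.List.mem_enumerate_iff _ _ _).1 hp
  constructor <;> simp <;> omega
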